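-- pv_equiv track=rewrite | github.com/G-K-404/comp-prog | Codeforces/morgsoa.py | min_ops
-- ===== SOURCE A (Python) =====
-- def min_ops(n: int) -> int:
--     if n == 0:
--         return 0
--     # iterative application of recurrence from MSB down
--     ans = 0
--     L = n.bit_length()
--     while L > 0:
--         top = 1 << (L - 1)
--         if n >= top:
--             # MSB is 1: apply D_L(2^{L-1}+m) = (2^L - 1) XOR D_{L-1}(m)
--             ans = ((1 << L) - 1) ^ ans
--             n -= top
--         # else MSB 0: nothing to ans, just drop MSB
--         L -= 1
--     return ans
-- ===== SOURCE B (Python) =====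
-- def min_ops(n: int) -> int:
--     # Gray-code decode: XOR-accumulate successive right shifts of n.
--     ans = 0
--     while n > 0:
--         ans ^= n
--         n >>= 1
--     return ans
-- ===== Notes on version B (the rewrite author's own statement) =====
-- stated objective: simpler
-- what changed: Replaces the MSB-down loop with bit-length, top-mask and subtraction by the standard Gray-to-binary decode that XOR-accumulates successive right shifts of n.
import Mathlib
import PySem

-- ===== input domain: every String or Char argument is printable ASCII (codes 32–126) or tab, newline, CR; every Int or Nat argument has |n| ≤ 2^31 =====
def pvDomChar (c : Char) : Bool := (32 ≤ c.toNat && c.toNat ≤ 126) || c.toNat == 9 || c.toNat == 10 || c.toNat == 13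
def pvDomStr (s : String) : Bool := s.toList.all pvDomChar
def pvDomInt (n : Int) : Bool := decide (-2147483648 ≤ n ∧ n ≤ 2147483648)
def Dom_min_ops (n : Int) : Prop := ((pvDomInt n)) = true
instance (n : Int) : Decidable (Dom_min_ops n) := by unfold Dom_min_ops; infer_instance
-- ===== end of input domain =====

-- B replaces A's MSB-down mask-and-subtract loop by the Gray-to-binary decode
-- (XOR-accumulate successive right shifts of n); objective: simpler.

-- ===== PORT A =====
-- the while loop over L with state (n, ans); '1 << k' ported as 2^k, '^' as Int.xor
def min_ops_go (L : Nat) (n ans : Int) : Int :=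
  match L with
  | 0 => ans
  | L' + 1 =>
    let top : Int := 2 ^ L'
    if n ≥ top then min_ops_go L' (n - top) (Int.xor (2 ^ (L' + 1) - 1) ans)
    else min_ops_go L' n ans

def min_ops (n : Int) : Int :=
  if n = 0 then 0
  else min_ops_go (PySem.Int.bitLength n) n 0

-- ===== PORT B =====
-- while n > 0: ans ^= n; n >>= 1  ('n >> 1' ported as floor division by 2, '^' as Int.xor)
def min_ops_alt_go (n ans : Int) : Int :=
  if 0 < n then min_ops_alt_go (PySem.Int.floordiv n 2) (Int.xor ans n) else ans
termination_by n.toNat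
decreasing_by
  rename_i h
  rw [PySem.Int.floordiv_eq_ediv_of_pos (by omega)]
  omega

def min_ops_alt (n : Int) : Int := min_ops_alt_go n 0

-- ===== PRECONDITION & SPEC =====
def Spec_min_ops (n : Int) (out : Int) : Prop := out = min_ops_alt n
instance (n : Int) (out : Int) : Decidable (Spec_min_ops n out) := by unfold Spec_min_ops; infer_instance

-- ===== CLAIM (what is proved, stated in full; the proofs are below) =====
def Claim_equal_min_ops : Prop := ∀ (n : Int), Dom_min_ops n → Spec_min_ops n (min_ops n)

-- ===== LEMMAS AND PROOFS =====

-- the Gray-to-binary decode on Nat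
def gdec (m : Nat) : Nat :=
  if m = 0 then 0 else m ^^^ gdec (m / 2)
decreasing_by omega

theorem gdec_zero : gdec 0 = 0 := by simp [gdec]

theorem gdec_eq (m : Nat) : gdec m = m ^^^ gdec (m / 2) := by
  rcases Nat.eq_zero_or_pos m with h | h
  · subst h; simp [gdec_zero]
  · rw [gdec]; simp [Nat.pos_iff_ne_zero.mp h]

-- the bit identity behind A's recurrence step
theorem key_xor (L m : Nat) (h : m < 2 ^ L) :
    (2 ^ L + m) ^^^ (2 ^ L - 1) = (2 ^ (L + 1) - 1) ^^^ m := by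
  apply Nat.eq_of_testBit_eq
  intro i
  simp only [Nat.testBit_xor, Nat.testBit_two_pow_sub_one]
  rcases lt_trichotomy i L with hi | hi | hi
  · rw [Nat.testBit_two_pow_add_gt hi]
    simp [hi, Nat.lt_succ_of_lt hi]
  · subst hi
    rw [Nat.testBit_two_pow_add_eq, Nat.testBit_lt_two_pow h]
    simp
  · have h1 : 2 ^ L + m < 2 ^ i := by
      calc 2 ^ L + m < 2 ^ L + 2 ^ L := by omega
      _ = 2 ^ (L + 1) := by ring
      _ ≤ 2 ^ i := Nat.pow_le_pow_right (by norm_num) hi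
    have h2 : m < 2 ^ i := by omega
    rw [Nat.testBit_lt_two_pow h1, Nat.testBit_lt_two_pow h2]
    simp [Nat.not_lt.mpr hi, Nat.not_lt.mpr (Nat.le_of_lt hi)]

-- key recurrence: gdec (2^L + m) = (2^(L+1) - 1) ^^^ gdec m for m < 2^L
theorem gdec_key (L m : Nat) (h : m < 2 ^ L) :
    gdec (2 ^ L + m) = (2 ^ (L + 1) - 1) ^^^ gdec m := by
  induction L generalizing m with
  | zero =>
    have : m = 0 := by omega
    subst this
    norm_num [gdec_eq 1, gdec_zero]
  | succ L ih =>
    have hhalf : (2 ^ (L + 1) + m) / 2 = 2 ^ L + m / 2 := by omega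
    rw [gdec_eq (2 ^ (L + 1) + m), hhalf, ih (m / 2) (by omega), gdec_eq m]
    have hk := key_xor (L + 1) m h
    calc (2 ^ (L + 1) + m) ^^^ ((2 ^ (L + 1) - 1) ^^^ gdec (m / 2))
        = ((2 ^ (L + 1) + m) ^^^ (2 ^ (L + 1) - 1)) ^^^ gdec (m / 2) := by
          rw [Nat.xor_assoc]
      _ = ((2 ^ (L + 2) - 1) ^^^ m) ^^^ gdec (m / 2) := by rw [hk]
      _ = (2 ^ (L + 2) - 1) ^^^ (m ^^^ gdec (m / 2)) := by rw [Nat.xor_assoc]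

-- B's loop computes gdec (Nat-cast form; Int.xor on casts is Nat xor by rfl)
theorem xor_natCast (a b : Nat) : Int.xor (a : Int) (b : Int) = ((a ^^^ b : Nat) : Int) := rfl

theorem alt_go_eq (m : Nat) (a : Nat) :
    min_ops_alt_go (m : Int) (a : Int) = ((a ^^^ gdec m : Nat) : Int) := by
  induction m using Nat.strong_induction_on generalizing a with
  | _ m ih =>
    rcases Nat.eq_zero_or_pos m with h | h
    · subst h
      rw [min_ops_alt_go]
      simp [gdec_zero]
    · rw [min_ops_alt_go]
      have hpos : (0 : Int) < (m : Int) := by exact_mod_cast h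
      rw [if_pos hpos, xor_natCast]
      have hfd : PySem.Int.floordiv (m : Int) 2 = ((m / 2 : Nat) : Int) := by
        exact_mod_cast PySem.Int.floordiv_natCast m 2
      rw [hfd, ih (m / 2) (by omega)]
      rw [gdec_eq m, ← Nat.xor_assoc]

theorem alt_go_nonpos (n ans : Int) (h : n ≤ 0) : min_ops_alt_go n ans = ans := by
  rw [min_ops_alt_go]
  simp [Int.not_lt.mpr h]

-- A's loop computes gdec too
theorem go_eq (L : Nat) : ∀ (m a : Nat), m < 2 ^ L →
    min_ops_go L (m : Int) (a : Int) = ((a ^^^ gdec m : Nat) : Int) := by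
  induction L with
  | zero =>
    intro m a h
    have : m = 0 := by omega
    subst this
    simp [min_ops_go, gdec_zero]
  | succ L ih =>
    intro m a h
    rw [min_ops_go]
    by_cases hm : 2 ^ L ≤ m
    · have hge : ((m : Int) ≥ (2 : Int) ^ L) := by exact_mod_cast hm
      rw [if_pos hge]
      have hmask : ((2 : Int) ^ (L + 1) - 1) = (((2 ^ (L + 1) - 1 : Nat)) : Int) := by
        push_cast [Nat.one_le_two_pow]
        ring
      have hsub : (m : Int) - 2 ^ L = ((m - 2 ^ L : Nat) : Int) := by
        push_cast [hm]
        ring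
      rw [hmask, xor_natCast, hsub, ih (m - 2 ^ L) _ (by omega)]
      have hdecomp : m = 2 ^ L + (m - 2 ^ L) := by omega
      have hkey := gdec_key L (m - 2 ^ L) (by omega)
      rw [← hdecomp] at hkey
      rw [hkey, ← Nat.xor_assoc, Nat.xor_comm a (2 ^ (L + 1) - 1)]
    · have hge : ¬ ((m : Int) ≥ (2 : Int) ^ L) := by
        rw [ge_iff_le, Int.not_le]
        exact_mod_cast Nat.lt_of_not_le hm
      rw [if_neg hge]
      exact ih m a (Nat.lt_of_not_le hm)

theorem go_nonpos (L : Nat) : ∀ (n ans : Int), n ≤ 0 → min_ops_go L n ans = ans := by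
  induction L with
  | zero => intro n ans _; rfl
  | succ L ih =>
    intro n ans h
    rw [min_ops_go]
    have : ¬ (n ≥ (2 : Int) ^ L) := by
      rw [ge_iff_le, Int.not_le]
      calc n ≤ 0 := h
        _ < 2 ^ L := by positivity
    rw [if_neg this]
    exact ih n ans h

-- ===== VERDICT (by name: the statement is the Claim_ definition above) =====
theorem min_ops_spec : Claim_equal_min_ops := by
  intro n _
  unfold Spec_min_ops min_ops min_ops_alt
  rcases lt_trichotomy n 0 with h | h | h
  · rw [if_neg (by omega), go_nonpos _ _ _ (le_of_lt h), alt_go_nonpos _ _ (le_of_lt h)]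
  · subst h
    rw [if_pos rfl, alt_go_nonpos _ _ (by omega)]
  · rw [if_neg (by omega)]
    have hcast : n = ((n.toNat : Nat) : Int) := by omega
    have hlt : n.toNat < 2 ^ PySem.Int.bitLength n := by
      have := PySem.Int.lt_two_pow_bitLength n
      omega
    rw [hcast] at hlt ⊢
    simp only [Int.toNat_natCast] at hlt
    rw [show (0 : Int) = ((0 : Nat) : Int) from rfl, go_eq _ _ 0 hlt, alt_go_eq n.toNat 0]
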